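-- pv_equiv track=rewrite | github.com/chrhein/metaheuristics | metaheuristics_project/tools/route_handler.py | route_planner
-- ===== SOURCE A (Python) =====
-- def route_planner(solution):
--     v_index = 1
--     v_route = []
--     routes = {}
--     for i in range(len(solution)):
--         popped = solution[i]
--         if popped == 0:
--             routes[v_index] = v_route
--             v_index += 1
--             v_route = []
--         else:
--             v_route.append(popped)
--     return routes
-- ===== SOURCE B (Python) =====
-- def route_planner(solution):
--     zeros = [i for i, x in enumerate(solution) if x == 0]
--     routes = {}
--     start = 0
--     for k, z in enumerate(zeros, 1):
--         routes[k] = solution[start:z]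
--         start = z + 1
--     return routes
-- ===== Notes on version B (the rewrite author's own statement) =====
-- stated objective: alternative
-- what changed: B first collects the indices of all zero separators and then cuts each route out of the solution as a slice between consecutive separators, instead of A's element-by-element accumulate-and-flush pass into a growing route list.
import Mathlib
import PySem

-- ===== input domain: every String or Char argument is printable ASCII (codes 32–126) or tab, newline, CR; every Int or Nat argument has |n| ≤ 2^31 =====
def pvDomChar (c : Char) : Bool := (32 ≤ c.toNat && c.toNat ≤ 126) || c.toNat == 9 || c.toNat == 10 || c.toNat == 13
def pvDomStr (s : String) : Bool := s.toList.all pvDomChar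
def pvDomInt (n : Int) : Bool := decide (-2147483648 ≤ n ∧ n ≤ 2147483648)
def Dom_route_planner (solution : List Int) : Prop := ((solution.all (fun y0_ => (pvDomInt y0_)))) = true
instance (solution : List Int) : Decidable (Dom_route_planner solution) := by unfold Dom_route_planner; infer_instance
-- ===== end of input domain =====

-- B replaces A's element-by-element accumulate-and-flush pass by collecting the zero-separator
-- indices first and cutting the routes out as slices (objective: alternative decomposition).

-- ===== PORT A =====
-- loop body of A: state is (v_index, v_route, routes); popped is the current element
def stepA (st : Int × List Int × PySem.Dict Int (List Int)) (popped : Int) :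
    Int × List Int × PySem.Dict Int (List Int) :=
  if popped == 0 then (st.1 + 1, [], st.2.2.insert st.1 st.2.1)
  else (st.1, st.2.1 ++ [popped], st.2.2)

def route_planner (solution : List Int) : List (Int × List Int) :=
  -- for i in range(len(solution)): popped = solution[i]  (i always in range, so pyGetD is exact)
  let fin := (PySem.List.pyRange 0 (PySem.List.len solution) 1).foldl
    (fun st i => stepA st (PySem.List.pyGetD solution i 0))
    (1, [], PySem.Dict.empty)
  fin.2.2.items

-- ===== PORT B =====
-- loop body of B: state is (routes, start); kz = (k, z) from enumerate(zeros, 1)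
def stepB (solution : List Int) (st : PySem.Dict Int (List Int) × Int) (kz : Int × Int) :
    PySem.Dict Int (List Int) × Int :=
  (st.1.insert kz.1 (PySem.List.slice solution (some st.2) (some kz.2)), kz.2 + 1)

def route_planner_alt (solution : List Int) : List (Int × List Int) :=
  let zeros := ((PySem.List.enumerate solution 0).filter (fun p => p.2 == 0)).map (fun p => p.1)
  let fin := (PySem.List.enumerate zeros 1).foldl (stepB solution) (PySem.Dict.empty, 0)
  fin.1.items

-- ===== PRECONDITION & SPEC =====
def Spec_route_planner (solution : List Int) (out : List (Int × List Int)) : Prop := out = route_planner_alt solution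
instance (solution : List Int) (out : List (Int × List Int)) : Decidable (Spec_route_planner solution out) := by unfold Spec_route_planner; infer_instance

-- ===== CLAIM (what is proved, stated in full; the proofs are below) =====
def Claim_equal_route_planner : Prop := ∀ (solution : List Int), Dom_route_planner solution → Spec_route_planner solution (route_planner solution)

-- ===== LEMMAS AND PROOFS =====

-- the routes both programs produce: split at zeros, trailing segment dropped
def segsAux (cur : List Int) : List Int → List (List Int)
  | [] => []
  | x :: xs => if x = 0 then cur :: segsAux [] xs else segsAux (cur ++ [x]) xs

lemma A_aux (xs : List Int) : ∀ (cur : List Int) (k : Int) (d : PySem.Dict Int (List Int)),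
    (∀ j, d.contains j = true → j < k) →
    ((xs.foldl stepA (k, cur, d)).2.2).items
      = d.items ++ PySem.List.enumerate (segsAux cur xs) k := by
  induction xs with
  | nil => intro cur k d _; simp [segsAux]

  | cons x xs ih =>
    intro cur k d hd
    by_cases hx : x = 0
    · subst hx
      have hkd : d.contains k = false := by
        by_contra h
        exact absurd (hd k (by revert h; cases d.contains k <;> simp)) (lt_irrefl k)
      simp only [List.foldl_cons, stepA]
      rw [if_pos (by simp : ((0:Int) == 0) = true)]
      rw [ih [] (k + 1) (d.insert k cur)
        (by intro j hj
            rw [PySem.Dict.contains_insert] at hj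
            rcases Bool.or_eq_true_iff.mp hj with h | h
            · have : j = k := by simpa using h
              omega
            · exact lt_trans (hd j h) (by omega))]
      simp [PySem.Dict.items_insert, hkd, segsAux, PySem.List.enumerate_cons]
    · simp only [List.foldl_cons, stepA]
      rw [if_neg (by simpa using hx)]
      rw [ih (cur ++ [x]) k d hd]
      simp [segsAux, hx]

-- the zero-index list, structurally
def zerosIdx (xs : List Int) (s : Int) : List Int :=
  ((PySem.List.enumerate xs s).filter (fun p => p.2 == 0)).map (fun p => p.1)

lemma zerosIdx_cons (x : Int) (xs : List Int) (s : Int) :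
    zerosIdx (x :: xs) s = if x = 0 then s :: zerosIdx xs (s + 1) else zerosIdx xs (s + 1) := by
  by_cases hx : x = 0 <;> simp [zerosIdx, PySem.List.enumerate_cons, hx]

lemma B_aux (sol : List Int) : ∀ (xs : List Int) (s start : Nat) (k : Int)
    (d : PySem.Dict Int (List Int)),
    xs = sol.drop s → start ≤ s → (∀ j, d.contains j = true → j < k) →
    ((PySem.List.enumerate (zerosIdx xs (s : Int)) k).foldl (stepB sol) (d, (start : Int))).1.items
      = d.items ++ PySem.List.enumerate (segsAux ((sol.drop start).take (s - start)) xs) k := by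
  intro xs
  induction xs with
  | nil => intro s start k d _ _ _; simp [zerosIdx, segsAux, PySem.List.enumerate]
  | cons x xs ih =>
    intro s start k d hxs hss hd
    have hdrop : xs = sol.drop (s + 1) := by
      have := congrArg List.tail hxs
      simpa [List.tail_drop] using this
    have hget : sol[s]? = some x := by
      have : (sol.drop s)[0]? = some x := by rw [← hxs]; rfl
      simpa using this
    rw [zerosIdx_cons]
    by_cases hx : x = 0
    · subst hx
      rw [if_pos rfl, PySem.List.enumerate_cons, List.foldl_cons]
      have hkd : d.contains k = false := by
        by_contra h
        exact absurd (hd k (by revert h; cases d.contains k <;> simp)) (lt_irrefl k)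
      have hslice : PySem.List.slice sol (some (start : Int)) (some (s : Int))
          = (sol.drop start).take (s - start) := PySem.List.slice_natCast sol start s
      show ((PySem.List.enumerate (zerosIdx xs ((s : Int) + 1)) (k + 1)).foldl (stepB sol)
          (d.insert k (PySem.List.slice sol (some (start : Int)) (some (s : Int))),
            (s : Int) + 1)).1.items = _
      have hcast : ((s : Int) + 1) = ((s + 1 : Nat) : Int) := by push_cast; ring
      rw [hcast, ih (s + 1) (s + 1) (k + 1) _ hdrop (le_refl _)
        (by intro j hj
            rw [PySem.Dict.contains_insert] at hj
            rcases Bool.or_eq_true_iff.mp hj with h | h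
            · have : j = k := by simpa using h
              omega
            · exact lt_trans (hd j h) (by omega))]
      rw [hslice]
      simp [PySem.Dict.items_insert, hkd, segsAux, PySem.List.enumerate_cons]
    · rw [if_neg hx]
      rw [show ((s : Int) + 1) = ((s + 1 : Nat) : Int) by push_cast; ring]
      rw [ih (s + 1) start k d hdrop (by omega) hd]
      have htake : (sol.drop start).take (s + 1 - start)
          = (sol.drop start).take (s - start) ++ [x] := by
        have hg : (sol.drop start)[s - start]? = some x := by
          rw [List.getElem?_drop]
          rwa [Nat.add_sub_cancel' hss]
        have : s + 1 - start = (s - start) + 1 := by omega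
        rw [this, List.take_add_one, hg]
        rfl
      rw [htake]
      simp [segsAux, hx]

-- ===== VERDICT (by name: the statement is the Claim_ definition above) =====
theorem route_planner_spec : Claim_equal_route_planner := by
  intro solution _
  show route_planner solution = route_planner_alt solution
  unfold route_planner route_planner_alt
  rw [PySem.List.foldl_pyRange_zero_pyGetD solution 0 stepA (1, [], PySem.Dict.empty)]
  rw [A_aux solution [] 1 PySem.Dict.empty (by intro j hj; simp [PySem.Dict.contains_empty] at hj)]
  have hB := B_aux solution solution 0 0 1 PySem.Dict.empty rfl (le_refl 0)
    (by intro j hj; simp [PySem.Dict.contains_empty] at hj)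
  simp only [List.drop_zero, Nat.sub_zero, List.take_zero, Nat.cast_zero] at hB
  rw [show ((PySem.List.enumerate solution 0).filter (fun p => p.2 == 0)).map (fun p => p.1)
      = zerosIdx solution 0 from rfl, hB]
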